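-- pv_equiv track=rewrite | github.com/KevinN-1qbit/kevin_test | utils/Translator.py | translate_to_ProjectQ
-- ===== SOURCE A (Python) =====
-- def translate_to_ProjectQ(instructions):
-- 	single_qubit_gateset = ['Measure','Allocate','Deallocate','H','X','Y','Z','S','T',"T^\dagger",'SqrtX','Ph','Ry','Rx','Rz','R']
-- 	two_qubit_gateset = ['CR','CX','SWAP','Entangle','CZ', 'CRy', 'Measure']
-- 	instructions_ProjectQ = []
-- 	for cmd in instructions:
-- 		gate = cmd[0]
-- 		if gate.upper() in single_qubit_gateset or gate.upper() in two_qubit_gateset: # for gates like H,X,Y,Z,S,T,SWAP etc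
-- 			instructions_ProjectQ.append((gate.upper(), cmd[1], cmd[2]))
-- 		elif gate[0].upper() + gate[1:] in single_qubit_gateset or gate[0].upper() + gate[1:] in two_qubit_gateset: # for gates like Measure, Allocate, Deallocate,T^\dagger,Ph,Ry,Rz,Rx,Entangle, Measure
-- 			instructions_ProjectQ.append((gate[0].upper() + gate[1:], cmd[1], cmd[2]))
-- 		elif '(' in gate and ')' in gate: # for gates like Ry,Rx,Rz,CR,ETC
-- 			gate_no_param = gate.split('(')[0]
-- 			if gate_no_param.upper() in single_qubit_gateset or gate_no_param.upper() in two_qubit_gateset: #for gates like R,CR,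
-- 				instructions_ProjectQ.append((gate_no_param.upper()+gate[len(gate_no_param):], cmd[1], cmd[2]))
-- 			elif gate_no_param[0].upper() + gate_no_param[1:] in single_qubit_gateset or gate_no_param[0].upper() + gate_no_param[1:] in two_qubit_gateset: #for gates like Ph,Ry,Rx,Rz
-- 				instructions_ProjectQ.append((gate_no_param[0].upper() + gate_no_param[1:] + gate[len(gate_no_param):], cmd[1],cmd[2]))
-- 		elif gate == 'id':
-- 			instructions_ProjectQ.append(('I',cmd[1],cmd[2]))
-- 		elif gate == 'sqrtx':
-- 			instructions_ProjectQ.append(('SqrtX',cmd[1],cmd[2]))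
-- 		elif gate == 'cy':
-- 			instructions_ProjectQ.append(('CRy',cmd[1],cmd[2]))
--
-- 	return instructions_ProjectQ
-- ===== SOURCE B (Python) =====
-- # Precomputed translation table: all matching gate spellings are enumerated once at
-- # module load (case variants of the all-uppercase names, exact + first-letter-lowered
-- # spellings of the mixed-case names), so the per-command work is plain dict lookups.
-- _UPPER_ONLY = ['H', 'X', 'Y', 'Z', 'S', 'T', 'R', 'CR', 'CX', 'SWAP', 'CZ']
-- _ALL_NAMES = ['Measure', 'Allocate', 'Deallocate', 'H', 'X', 'Y', 'Z', 'S', 'T',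
--               'T^\dagger', 'SqrtX', 'Ph', 'Ry', 'Rx', 'Rz', 'R',
--               'CR', 'CX', 'SWAP', 'Entangle', 'CZ', 'CRy']
--
-- def _case_variants(name):
--     """All strings s with s.upper() == name (name is uppercase letters only)."""
--     variants = ['']
--     for ch in name:
--         variants = [v + c for v in variants for c in (ch, ch.lower())]
--     return variants
--
-- def _build_table():
--     table = {}
--     for name in _UPPER_ONLY:                 # spellings matched case-insensitively
--         for variant in _case_variants(name):
--             table.setdefault(variant, name)
--     for name in _ALL_NAMES:                  # exact and first-letter-lowered spellings
--         table.setdefault(name, name)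
--         table.setdefault(name[0].lower() + name[1:], name)
--     return table
--
-- _TABLE = _build_table()
-- _ALIASES = {'id': 'I', 'sqrtx': 'SqrtX', 'cy': 'CRy'}
--
-- def translate_to_ProjectQ(instructions):
--     out = []
--     for cmd in instructions:
--         gate = cmd[0]
--         if gate in _TABLE:
--             out.append((_TABLE[gate], cmd[1], cmd[2]))
--         elif '(' in gate and ')' in gate:
--             head, sep, tail = gate.partition('(')
--             if head in _TABLE:
--                 out.append((_TABLE[head] + sep + tail, cmd[1], cmd[2]))
--         elif gate in _ALIASES:
--             out.append((_ALIASES[gate], cmd[1], cmd[2]))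
--     return out
-- ===== Notes on version B (the rewrite author's own statement) =====
-- stated objective: alternative
-- what changed: B precomputes one exhaustive lookup table at build time (every case variant of the all-uppercase gate names plus the exact and first-letter-lowered spellings of all names), so each command is translated by plain dict lookups (whole gate, else parenthesised head, else alias dict) instead of A's runtime upper()/capitalize transformations tested against two name lists in a nested if/elif ladder.
-- outside the precondition, e.g. on translate_to_ProjectQ([('', [], [])]): A raises IndexError, B returns []
-- crash fix: On inputs containing a command whose gate string is empty or starts with '(' while also containing ')', A raises IndexError (gate[0] / gate_no_param[0]); B simply drops the unmatched command and returns the translation of the rest. — e.g. on translate_to_ProjectQ([("", [], []), ("h", [0], [])]): A raises IndexError, B returns [("H", [0], [])]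
import Mathlib
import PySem

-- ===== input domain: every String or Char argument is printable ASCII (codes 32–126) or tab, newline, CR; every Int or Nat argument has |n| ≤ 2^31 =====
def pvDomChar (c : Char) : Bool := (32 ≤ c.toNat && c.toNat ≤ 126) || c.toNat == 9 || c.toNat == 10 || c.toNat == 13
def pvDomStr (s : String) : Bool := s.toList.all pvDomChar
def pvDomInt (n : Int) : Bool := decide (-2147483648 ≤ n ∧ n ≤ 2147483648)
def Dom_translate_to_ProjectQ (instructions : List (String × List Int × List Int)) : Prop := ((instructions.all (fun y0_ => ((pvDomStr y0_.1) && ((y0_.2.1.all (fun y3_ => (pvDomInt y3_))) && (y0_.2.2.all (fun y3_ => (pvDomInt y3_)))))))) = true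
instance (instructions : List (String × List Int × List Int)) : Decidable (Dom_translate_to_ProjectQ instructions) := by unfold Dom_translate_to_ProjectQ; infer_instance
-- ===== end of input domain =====

-- B precomputes one exhaustive lookup table (every matching gate spelling, enumerated at build time),
-- so the per-command work is plain dict lookups instead of A's transform-and-test branch ladder
-- (objective: alternative decomposition, same cost).

-- ===== PORT A =====
-- Python string values are carried as List Char (PySem.Chars); wrapped with String.ofList on emit.
def pvS1 : List (List Char) :=
  ["Measure","Allocate","Deallocate","H","X","Y","Z","S","T","T^\\dagger","SqrtX","Ph","Ry","Rx","Rz","R"].map String.toList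
def pvS2 : List (List Char) :=
  ["CR","CX","SWAP","Entangle","CZ","CRy","Measure"].map String.toList

-- gate[0].upper() + gate[1:]; the [] case is unreachable under Pre_ (Python raises IndexError there)
def pvCap (g : List Char) : List Char :=
  match g with
  | [] => []
  | c :: cs => PySem.Chars.upperChar c :: cs

-- the body of A's loop for one command's gate string: the name appended, or none (command dropped)
def pvBranchA (g : List Char) : Option (List Char) :=
  if PySem.Chars.upper g ∈ pvS1 ∨ PySem.Chars.upper g ∈ pvS2 then
    some (PySem.Chars.upper g)
  else if pvCap g ∈ pvS1 ∨ pvCap g ∈ pvS2 then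
    some (pvCap g)
  else if '(' ∈ g ∧ ')' ∈ g then
    -- gate.split('(')[0] = longest prefix before the first '(' (exact since '(' ∈ g);
    -- gate[len(gate_no_param):] = g.drop p.length
    let p := g.takeWhile (fun c => c ≠ '(')
    if PySem.Chars.upper p ∈ pvS1 ∨ PySem.Chars.upper p ∈ pvS2 then
      some (PySem.Chars.upper p ++ g.drop p.length)
    else if pvCap p ∈ pvS1 ∨ pvCap p ∈ pvS2 then
      some (pvCap p ++ g.drop p.length)
    else none
  else if g = "id".toList then some "I".toList
  else if g = "sqrtx".toList then some "SqrtX".toList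
  else if g = "cy".toList then some "CRy".toList
  else none

def translate_to_ProjectQ (instructions : List (String × List Int × List Int)) : List (String × List Int × List Int) :=
  instructions.foldl (fun acc cmd =>
    match pvBranchA cmd.1.toList with
    | some name => acc ++ [(String.ofList name, cmd.2.1, cmd.2.2)]
    | none => acc) []

-- ===== PORT B =====
-- Source B: _UPPER_ONLY / _ALL_NAMES and the table built from them once with dict.setdefault
def pvUpperOnly : List (List Char) :=
  ["H","X","Y","Z","S","T","R","CR","CX","SWAP","CZ"].map String.toList
def pvAllNames : List (List Char) :=
  ["Measure","Allocate","Deallocate","H","X","Y","Z","S","T","T^\\dagger","SqrtX","Ph","Ry","Rx","Rz","R","CR","CX","SWAP","Entangle","CZ","CRy"].map String.toList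

-- one step of Source B's _case_variants loop: variants = [v + c for v in variants for c in (ch, ch.lower())]
def pvStepVar (vs : List (List Char)) (ch : Char) : List (List Char) :=
  vs.flatMap (fun v => [v ++ [ch], v ++ [PySem.Chars.lowerChar ch]])

def pvCaseVariants (name : List Char) : List (List Char) := name.foldl pvStepVar [[]]

-- name[0].lower() + name[1:] (every table name is nonempty)
def pvLowerFirst (name : List Char) : List Char :=
  match name with
  | [] => []
  | c :: cs => PySem.Chars.lowerChar c :: cs

-- _build_table(): setdefault keeps the first entry for a key, exactly as in Source B
def pvTable : PySem.Dict (List Char) (List Char) :=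
  let t1 := pvUpperOnly.foldl (fun t name =>
    (pvCaseVariants name).foldl (fun t v => t.setdefault v name) t) PySem.Dict.empty
  pvAllNames.foldl (fun t name => (t.setdefault name name).setdefault (pvLowerFirst name) name) t1

def pvAliases : PySem.Dict (List Char) (List Char) :=
  PySem.Dict.mk [("id".toList, "I".toList), ("sqrtx".toList, "SqrtX".toList), ("cy".toList, "CRy".toList)]

-- the body of B's loop: table hit, else parenthesised head via the same table, else alias dict
def pvNameB (g : List Char) : Option (List Char) :=
  match pvTable.get? g with
  | some name => some name
  | none =>
    if '(' ∈ g ∧ ')' ∈ g then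
      -- head, sep, tail = gate.partition('('): head = prefix before the first '(', sep+tail = g.drop head.length
      let head := g.takeWhile (fun c => c ≠ '(')
      (pvTable.get? head).map (fun t => t ++ g.drop head.length)
    else pvAliases.get? g

def translate_to_ProjectQ_alt (instructions : List (String × List Int × List Int)) : List (String × List Int × List Int) :=
  instructions.foldl (fun acc cmd =>
    match pvNameB cmd.1.toList with
    | some name => acc ++ [(String.ofList name, cmd.2.1, cmd.2.2)]
    | none => acc) []

-- ===== PRECONDITION & SPEC =====
-- Pre_ excludes exactly the commands on which Python A raises IndexError: an empty gate string
-- (gate[0] out of range), or a gate starting with '(' that also contains ')' (gate.split('(')[0]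
-- is empty, so gate_no_param[0] is out of range).
def Pre_translate_to_ProjectQ (instructions : List (String × List Int × List Int)) : Prop :=
  ∀ cmd ∈ instructions, cmd.1.toList ≠ [] ∧ ¬(cmd.1.toList.headD ' ' = '(' ∧ ')' ∈ cmd.1.toList)
instance (instructions : List (String × List Int × List Int)) : Decidable (Pre_translate_to_ProjectQ instructions) := by unfold Pre_translate_to_ProjectQ; infer_instance

def pvWitness_translate_to_ProjectQ : (List (String × List Int × List Int)) :=
  [("h", [0], []), ("ry(0.5)", [1], [2]), ("id", [2], []), ("foo", [3], [])]

-- On inputs holding a command with an empty gate string, or a gate starting with '(' that also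
-- contains ')', Python A raises IndexError while B simply drops the unmatched command and returns.
def Raises_translate_to_ProjectQ (instructions : List (String × List Int × List Int)) : Prop :=
  ∃ cmd ∈ instructions, cmd.1.toList = [] ∨ (cmd.1.toList.headD ' ' = '(' ∧ ')' ∈ cmd.1.toList)
instance (instructions : List (String × List Int × List Int)) : Decidable (Raises_translate_to_ProjectQ instructions) := by unfold Raises_translate_to_ProjectQ; infer_instance

def pvRaiseWitness_translate_to_ProjectQ : (List (String × List Int × List Int)) :=
  [("", [], []), ("h", [0], [])]
def pvRaiseWitnessOut_translate_to_ProjectQ : List (String × List Int × List Int) :=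
  [("H", [0], [])]

def Spec_translate_to_ProjectQ (instructions : List (String × List Int × List Int)) (out : List (String × List Int × List Int)) : Prop := out = translate_to_ProjectQ_alt instructions
instance (instructions : List (String × List Int × List Int)) (out : List (String × List Int × List Int)) : Decidable (Spec_translate_to_ProjectQ instructions out) := by unfold Spec_translate_to_ProjectQ; infer_instance

-- ===== CLAIM (what is proved, stated in full; the proofs are below) =====
def Claim_equal_translate_to_ProjectQ : Prop := ∀ (instructions : List (String × List Int × List Int)), Dom_translate_to_ProjectQ instructions → Pre_translate_to_ProjectQ instructions → Spec_translate_to_ProjectQ instructions (translate_to_ProjectQ instructions)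
def Claim_raises_translate_to_ProjectQ : Prop := (∀ (instructions : List (String × List Int × List Int)), Dom_translate_to_ProjectQ instructions → Raises_translate_to_ProjectQ instructions → ¬ Pre_translate_to_ProjectQ instructions) ∧ (Dom_translate_to_ProjectQ (pvRaiseWitness_translate_to_ProjectQ) ∧ Raises_translate_to_ProjectQ (pvRaiseWitness_translate_to_ProjectQ) ∧ translate_to_ProjectQ_alt (pvRaiseWitness_translate_to_ProjectQ) = pvRaiseWitnessOut_translate_to_ProjectQ)

-- ===== LEMMAS AND PROOFS =====

-- character-level facts about upperChar/lowerChar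
theorem charToNat_inj {a b : Char} (h : a.toNat = b.toNat) : a = b := by
  rw [← Char.ofNat_toNat a, ← Char.ofNat_toNat b, h]

theorem toNat_ofNat_small {n : Nat} (h : n < 55296) : (Char.ofNat n).toNat = n := by
  rw [Char.toNat_ofNat, if_pos (Or.inl h)]

theorem char_le_iff (a b : Char) : (a ≤ b) ↔ a.toNat ≤ b.toNat := by
  rw [Char.le_def, UInt32.le_iff_toNat_le]; rfl

theorem islower_iff (c : Char) : PySem.Chars.islower c = true ↔ (97 ≤ c.toNat ∧ c.toNat ≤ 122) := by
  simp [PySem.Chars.islower, char_le_iff]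

theorem isupper_iff (c : Char) : PySem.Chars.isupper c = true ↔ (65 ≤ c.toNat ∧ c.toNat ≤ 90) := by
  simp [PySem.Chars.isupper, char_le_iff]

theorem upperChar_eq_iff (c d : Char) (hc : PySem.Chars.isupper c = true) :
    PySem.Chars.upperChar d = c ↔ (d = c ∨ d = PySem.Chars.lowerChar c) := by
  have hc' := (isupper_iff c).mp hc
  have hlc : (PySem.Chars.lowerChar c).toNat = c.toNat + 32 := by
    rw [PySem.Chars.lowerChar, if_pos hc, toNat_ofNat_small (by omega)]
  unfold PySem.Chars.upperChar
  by_cases hd : PySem.Chars.islower d = true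
  · have hd' := (islower_iff d).mp hd
    rw [if_pos hd]
    constructor
    · intro h
      right
      apply charToNat_inj
      have := congrArg Char.toNat h
      rw [toNat_ofNat_small (by omega)] at this
      omega
    · rintro (rfl | rfl)
      · omega
      · apply charToNat_inj
        rw [toNat_ofNat_small (by omega)]
        omega
  · rw [if_neg hd]
    constructor
    · intro h; exact Or.inl h
    · rintro (rfl | rfl)
      · rfl
      · exact absurd ((islower_iff _).mpr (by omega)) hd

theorem upperChar_of_isupper {c : Char} (hc : PySem.Chars.isupper c = true) :
    PySem.Chars.upperChar c = c := (upperChar_eq_iff c c hc).mpr (Or.inl rfl)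

theorem upperChar_lowerChar {c : Char} (hc : PySem.Chars.isupper c = true) :
    PySem.Chars.upperChar (PySem.Chars.lowerChar c) = c :=
  (upperChar_eq_iff c _ hc).mpr (Or.inr rfl)

theorem upperChar_not_islower (d : Char) : PySem.Chars.islower (PySem.Chars.upperChar d) = false := by
  unfold PySem.Chars.upperChar
  by_cases hd : PySem.Chars.islower d = true
  · have hd' := (islower_iff d).mp hd
    rw [if_pos hd, Bool.eq_false_iff]
    intro h
    have := (islower_iff _).mp h
    rw [toNat_ofNat_small (by omega)] at this
    omega
  · rw [if_neg hd]
    exact Bool.not_eq_true _ |>.mp hd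

-- recursive description of the set of case variants built by Source B's fold
def pvCvr : List Char → List (List Char)
  | [] => [[]]
  | c :: cs => (pvCvr cs).flatMap (fun t => [c :: t, PySem.Chars.lowerChar c :: t])

theorem mem_fold_cv (cs : List Char) : ∀ (vs : List (List Char)) (s : List Char),
    s ∈ cs.foldl pvStepVar vs ↔ ∃ v ∈ vs, ∃ t ∈ pvCvr cs, s = v ++ t := by
  induction cs with
  | nil => intro vs s; simp [pvCvr]
  | cons c cs ih =>
    intro vs s
    rw [List.foldl_cons, ih]
    constructor
    · rintro ⟨v', hv', t, ht, rfl⟩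
      simp only [pvStepVar, List.mem_flatMap, List.mem_cons, List.not_mem_nil, or_false] at hv'
      obtain ⟨v, hv, h2 | h2⟩ := hv' <;> subst h2
      · exact ⟨v, hv, c :: t, by simp [pvCvr]; exact ⟨t, ht, Or.inl rfl⟩, by simp⟩
      · exact ⟨v, hv, PySem.Chars.lowerChar c :: t, by simp [pvCvr]; exact ⟨t, ht, Or.inr rfl⟩, by simp⟩
    · rintro ⟨v, hv, t', ht', rfl⟩
      simp only [pvCvr, List.mem_flatMap, List.mem_cons, List.not_mem_nil, or_false] at ht'
      obtain ⟨t, ht, h2 | h2⟩ := ht' <;> subst h2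
      · exact ⟨v ++ [c], by simp [pvStepVar]; exact ⟨v, hv, Or.inl rfl⟩, t, ht, by simp⟩
      · exact ⟨v ++ [PySem.Chars.lowerChar c], by simp [pvStepVar]; exact ⟨v, hv, Or.inr rfl⟩, t, ht, by simp⟩

theorem mem_caseVariants (name s : List Char) : s ∈ pvCaseVariants name ↔ s ∈ pvCvr name := by
  unfold pvCaseVariants
  rw [mem_fold_cv]
  simp

theorem mem_cvr (e : List Char) (he : e.all PySem.Chars.isupper = true) (g : List Char) :
    g ∈ pvCvr e ↔ PySem.Chars.upper g = e := by
  induction e generalizing g with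
  | nil =>
    simp [pvCvr, PySem.Chars.upper]
  | cons c cs ih =>
    simp only [List.all_cons, Bool.and_eq_true] at he
    obtain ⟨hc, hcs⟩ := he
    cases g with
    | nil =>
      simp [pvCvr, PySem.Chars.upper]
    | cons d ds =>
      simp only [pvCvr, List.mem_flatMap, List.mem_cons, List.not_mem_nil, or_false,
        PySem.Chars.upper, List.map_cons]
      constructor
      · rintro ⟨t, ht, h | h⟩ <;> (injection h with h1 h2; subst h2; subst h1)
        · rw [upperChar_of_isupper hc,
            show List.map PySem.Chars.upperChar ds = cs from by
              simpa [PySem.Chars.upper] using (ih hcs ds).mp ht]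
        · rw [upperChar_lowerChar hc,
            show List.map PySem.Chars.upperChar ds = cs from by
              simpa [PySem.Chars.upper] using (ih hcs ds).mp ht]
      · intro h
        injection h with h1 h2
        refine ⟨ds, (ih hcs ds).mpr (by simpa [PySem.Chars.upper] using h2), ?_⟩
        rcases (upperChar_eq_iff c d hc).mp h1 with rfl | rfl
        · exact Or.inl rfl
        · exact Or.inr rfl

-- first-match association-list lookup: what Source B's setdefault-built dict computes
def pvLook : List (List Char × List Char) → List Char → Option (List Char)
  | [], _ => none
  | (k, v) :: rest, g => if k = g then some v else pvLook rest g

theorem pvLook_append (L1 L2 : List (List Char × List Char)) (g : List Char) :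
    pvLook (L1 ++ L2) g = (pvLook L1 g).or (pvLook L2 g) := by
  induction L1 with
  | nil => simp [pvLook]
  | cons p L ih =>
    obtain ⟨k, v⟩ := p
    by_cases h : k = g <;> simp [pvLook, h, ih]

theorem get?_foldl_setdefault (L : List (List Char × List Char)) :
    ∀ (d : PySem.Dict (List Char) (List Char)) (g : List Char),
      (L.foldl (fun t p => t.setdefault p.1 p.2) d).get? g = (d.get? g).or (pvLook L g) := by
  induction L with
  | nil => intro d g; simp [pvLook]
  | cons p L ih =>
    intro d g
    obtain ⟨k, v⟩ := p
    rw [List.foldl_cons, ih]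
    dsimp only
    by_cases h : k = g
    · subst h
      rw [PySem.Dict.get?_setdefault_self]
      simp only [pvLook, if_pos rfl]
      cases d.get? k <;> simp
    · rw [PySem.Dict.get?_setdefault_of_ne _ _ (Ne.symm h)]
      simp [pvLook, h]

def pvE1 : List (List Char × List Char) :=
  pvUpperOnly.flatMap (fun e => (pvCaseVariants e).map (fun v => (v, e)))
def pvE2 : List (List Char × List Char) :=
  pvAllNames.flatMap (fun e => [(e, e), (pvLowerFirst e, e)])

theorem foldl_flatMap_dict (l : List (List Char)) (f : List Char → List (List Char × List Char)) :
    ∀ d : PySem.Dict (List Char) (List Char),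
      (l.flatMap f).foldl (fun t p => t.setdefault p.1 p.2) d =
        l.foldl (fun t e => (f e).foldl (fun t p => t.setdefault p.1 p.2) t) d := by
  induction l with
  | nil => intro d; simp
  | cons e l ih => intro d; simp [List.flatMap_cons, List.foldl_append, ih]

theorem pvTable_get? (g : List Char) :
    pvTable.get? g = (pvLook pvE1 g).or (pvLook pvE2 g) := by
  have hf1 : (fun (t : PySem.Dict (List Char) (List Char)) (e : List Char) =>
        ((pvCaseVariants e).map (fun v => (v, e))).foldl (fun t p => t.setdefault p.1 p.2) t)
      = (fun t name => (pvCaseVariants name).foldl (fun t v => t.setdefault v name) t) := by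
    funext t e
    rw [List.foldl_map]
  have hf2 : (fun (t : PySem.Dict (List Char) (List Char)) (e : List Char) =>
        ([(e, e), (pvLowerFirst e, e)] : List (List Char × List Char)).foldl
          (fun t p => t.setdefault p.1 p.2) t)
      = (fun t name => (t.setdefault name name).setdefault (pvLowerFirst name) name) := by
    funext t e
    simp only [List.foldl_cons, List.foldl_nil]
  have h1 : pvTable = (pvE1 ++ pvE2).foldl (fun t p => t.setdefault p.1 p.2) PySem.Dict.empty := by
    rw [List.foldl_append]
    unfold pvTable pvE1 pvE2
    rw [foldl_flatMap_dict, foldl_flatMap_dict, hf1, hf2]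
  rw [h1, get?_foldl_setdefault, pvLook_append, PySem.Dict.get?_empty, Option.none_or]

theorem look_map_const (L : List (List Char)) (e g : List Char) :
    pvLook (L.map (fun v => (v, e))) g = if g ∈ L then some e else none := by
  induction L with
  | nil => simp [pvLook]
  | cons x L ih =>
    by_cases h : x = g
    · subst h; simp [pvLook, ih]
    · simp [pvLook, h, ih, Ne.symm h]

theorem chainE1 (g : List Char) :
    ∀ es : List (List Char), (∀ e ∈ es, e.all PySem.Chars.isupper = true) →
      pvLook (es.flatMap (fun e => (pvCaseVariants e).map (fun v => (v, e)))) g =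
        if PySem.Chars.upper g ∈ es then some (PySem.Chars.upper g) else none := by
  intro es
  induction es with
  | nil => intro _; simp [pvLook]
  | cons e es ih =>
    intro he
    rw [List.flatMap_cons, pvLook_append, look_map_const,
      ih (fun x hx => he x (List.mem_cons_of_mem e hx))]
    have hmem : g ∈ pvCaseVariants e ↔ PySem.Chars.upper g = e := by
      rw [mem_caseVariants]
      exact mem_cvr e (he e (List.mem_cons_self)) g
    by_cases h : PySem.Chars.upper g = e
    · rw [if_pos (hmem.mpr h), h]
      simp
    · rw [if_neg (fun hx => h (hmem.mp hx))]
      simp only [Option.none_or, List.mem_cons]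
      by_cases h2 : PySem.Chars.upper g ∈ es <;> simp [h, h2]

theorem cap_eq_iff (e g : List Char) (he1 : e ≠ [])
    (he2 : PySem.Chars.isupper (e.headD ' ') = true) :
    pvCap g = e ↔ (g = e ∨ g = pvLowerFirst e) := by
  cases e with
  | nil => exact absurd rfl he1
  | cons c cs =>
    simp only [List.headD_cons] at he2
    cases g with
    | nil => simp [pvCap, pvLowerFirst]
    | cons d ds =>
      simp only [pvCap, pvLowerFirst, List.cons.injEq]
      rw [upperChar_eq_iff c d he2]
      constructor
      · rintro ⟨rfl | rfl, rfl⟩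
        · exact Or.inl ⟨rfl, rfl⟩
        · exact Or.inr ⟨rfl, rfl⟩
      · rintro (⟨rfl, rfl⟩ | ⟨rfl, rfl⟩)
        · exact ⟨Or.inl rfl, rfl⟩
        · exact ⟨Or.inr rfl, rfl⟩

theorem chainE2 (g : List Char) :
    ∀ es : List (List Char), (∀ e ∈ es, e ≠ [] ∧ PySem.Chars.isupper (e.headD ' ') = true) →
      pvLook (es.flatMap (fun e => [(e, e), (pvLowerFirst e, e)])) g =
        if pvCap g ∈ es then some (pvCap g) else none := by
  intro es
  induction es with
  | nil => intro _; simp [pvLook]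
  | cons e es ih =>
    intro he
    rw [List.flatMap_cons, pvLook_append, ih (fun x hx => he x (List.mem_cons_of_mem e hx))]
    obtain ⟨he1, he2⟩ := he e List.mem_cons_self
    have hpair : pvLook [(e, e), (pvLowerFirst e, e)] g = if pvCap g = e then some e else none := by
      by_cases h1 : e = g
      · rw [if_pos ((cap_eq_iff e g he1 he2).mpr (Or.inl h1.symm))]
        simp [pvLook, h1]
      · by_cases h2 : pvLowerFirst e = g
        · rw [if_pos ((cap_eq_iff e g he1 he2).mpr (Or.inr h2.symm))]
          simp [pvLook, h1, h2]
        · rw [if_neg (fun hx => by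
            rcases (cap_eq_iff e g he1 he2).mp hx with rfl | rfl
            · exact h1 rfl
            · exact h2 rfl)]
          simp [pvLook, h1, h2]
    rw [hpair]
    by_cases h : pvCap g = e
    · rw [if_pos h, h]
      simp
    · rw [if_neg h]
      simp only [Option.none_or, List.mem_cons]
      by_cases h2 : pvCap g ∈ es <;> simp [h, h2]

-- every character of gate.upper() is non-lowercase, so upper g only ever hits all-uppercase names
theorem not_islower_mem_upper (g : List Char) (c : Char) (h : c ∈ PySem.Chars.upper g) :
    PySem.Chars.islower c = false := by
  rw [PySem.Chars.upper, List.mem_map] at h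
  obtain ⟨d, _, rfl⟩ := h
  exact upperChar_not_islower d

theorem cond1_iff (g : List Char) :
    (PySem.Chars.upper g ∈ pvS1 ∨ PySem.Chars.upper g ∈ pvS2) ↔ PySem.Chars.upper g ∈ pvUpperOnly := by
  constructor
  · intro h
    have hno := not_islower_mem_upper g
    rcases h with h | h
    · simp only [pvS1, List.map_cons, List.map_nil, List.mem_cons, List.not_mem_nil, or_false] at h
      rcases h with h | h | h | h | h | h | h | h | h | h | h | h | h | h | h | h <;>
        first
          | (rw [h]; decide)
          | (exact absurd (hno 'e' (by rw [h]; decide)) (by decide))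
          | (exact absurd (hno 'l' (by rw [h]; decide)) (by decide))
          | (exact absurd (hno 'a' (by rw [h]; decide)) (by decide))
          | (exact absurd (hno 'q' (by rw [h]; decide)) (by decide))
          | (exact absurd (hno 'h' (by rw [h]; decide)) (by decide))
          | (exact absurd (hno 'y' (by rw [h]; decide)) (by decide))
          | (exact absurd (hno 'x' (by rw [h]; decide)) (by decide))
          | (exact absurd (hno 'z' (by rw [h]; decide)) (by decide))
    · simp only [pvS2, List.map_cons, List.map_nil, List.mem_cons, List.not_mem_nil, or_false] at h
      rcases h with h | h | h | h | h | h | h <;>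
        first
          | (rw [h]; decide)
          | (exact absurd (hno 'e' (by rw [h]; decide)) (by decide))
          | (exact absurd (hno 'n' (by rw [h]; decide)) (by decide))
          | (exact absurd (hno 'y' (by rw [h]; decide)) (by decide))
  · intro h
    have hs : pvUpperOnly ⊆ pvS1 ++ pvS2 := by decide
    exact List.mem_append.mp (hs h)

theorem cond2_iff (x : List Char) : (x ∈ pvS1 ∨ x ∈ pvS2) ↔ x ∈ pvAllNames := by
  constructor
  · intro h
    have hs : pvS1 ++ pvS2 ⊆ pvAllNames := by decide
    exact hs (List.mem_append.mpr h)
  · intro h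
    have hs : pvAllNames ⊆ pvS1 ++ pvS2 := by decide
    exact List.mem_append.mp (hs h)

-- the table lookup computes exactly A's first two branches
theorem tableA (g : List Char) :
    pvTable.get? g =
      (if PySem.Chars.upper g ∈ pvS1 ∨ PySem.Chars.upper g ∈ pvS2 then some (PySem.Chars.upper g)
       else if pvCap g ∈ pvS1 ∨ pvCap g ∈ pvS2 then some (pvCap g)
       else none) := by
  rw [pvTable_get?]
  have h1 : pvLook pvE1 g =
      if PySem.Chars.upper g ∈ pvUpperOnly then some (PySem.Chars.upper g) else none := by
    unfold pvE1
    exact chainE1 g pvUpperOnly (by decide)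
  have h2 : pvLook pvE2 g = if pvCap g ∈ pvAllNames then some (pvCap g) else none := by
    unfold pvE2
    exact chainE2 g pvAllNames (by decide)
  rw [h1, h2]
  by_cases c1 : PySem.Chars.upper g ∈ pvS1 ∨ PySem.Chars.upper g ∈ pvS2
  · rw [if_pos ((cond1_iff g).mp c1), if_pos c1]
    simp
  · rw [if_neg (fun hx => c1 ((cond1_iff g).mpr hx)), if_neg c1, Option.none_or]
    by_cases c2 : pvCap g ∈ pvS1 ∨ pvCap g ∈ pvS2
    · rw [if_pos ((cond2_iff _).mp c2), if_pos c2]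
    · rw [if_neg (fun hx => c2 ((cond2_iff _).mpr hx)), if_neg c2]

-- the alias dict lookup, written as A's trailing equality chain
theorem aliasGet (g : List Char) :
    pvAliases.get? g =
      (if g = "id".toList then some "I".toList
       else if g = "sqrtx".toList then some "SqrtX".toList
       else if g = "cy".toList then some "CRy".toList
       else none) := by
  by_cases h1 : g = "id".toList
  · subst h1; simp [pvAliases, PySem.Dict.get?_mk_cons]
  · by_cases h2 : g = "sqrtx".toList
    · subst h2; simp [pvAliases, PySem.Dict.get?_mk_cons]
    · by_cases h3 : g = "cy".toList
      · subst h3; simp [pvAliases, PySem.Dict.get?_mk_cons]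
      · have e1 : ((['i','d'] : List Char) == g) = false := beq_eq_false_iff_ne.mpr (Ne.symm h1)
        have e2 : ((['s','q','r','t','x'] : List Char) == g) = false := beq_eq_false_iff_ne.mpr (Ne.symm h2)
        have e3 : ((['c','y'] : List Char) == g) = false := beq_eq_false_iff_ne.mpr (Ne.symm h3)
        rw [if_neg h1, if_neg h2, if_neg h3]
        simp [pvAliases, PySem.Dict.get?_mk_cons, e1, e2, e3,
          (PySem.Dict.get?_eq_none_iff_contains (PySem.Dict.mk ([] : List (List Char × List Char))) g).mpr rfl]

-- the per-command name computed by B equals the one computed by A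
theorem pvName_eq (g : List Char) : pvNameB g = pvBranchA g := by
  unfold pvNameB pvBranchA
  simp only [tableA]
  by_cases c1 : PySem.Chars.upper g ∈ pvS1 ∨ PySem.Chars.upper g ∈ pvS2
  · simp [c1]
  · by_cases c2 : pvCap g ∈ pvS1 ∨ pvCap g ∈ pvS2
    · simp [c1, c2]
    · by_cases hp : ('(' ∈ g ∧ ')' ∈ g)
      · simp only [if_neg c1, if_neg c2, if_pos hp]
        by_cases p1 : PySem.Chars.upper (List.takeWhile (fun c => !decide (c = '(')) g) ∈ pvS1 ∨
            PySem.Chars.upper (List.takeWhile (fun c => !decide (c = '(')) g) ∈ pvS2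
        · simp [p1]
        · by_cases p2 : pvCap (List.takeWhile (fun c => !decide (c = '(')) g) ∈ pvS1 ∨
              pvCap (List.takeWhile (fun c => !decide (c = '(')) g) ∈ pvS2
          · simp [p1, p2]
          · simp [p1, p2]
      · simp only [if_neg c1, if_neg c2, if_neg hp]
        rw [aliasGet]

-- ===== VERDICT (by name: the statement is the Claim_ definition above) =====
theorem translate_to_ProjectQ_spec : Claim_equal_translate_to_ProjectQ := by
  intro instructions _ _
  unfold Spec_translate_to_ProjectQ translate_to_ProjectQ translate_to_ProjectQ_alt
  have hstep : (fun (acc : List (String × List Int × List Int)) (cmd : String × List Int × List Int) =>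
      match pvBranchA cmd.1.toList with
      | some name => acc ++ [(String.ofList name, cmd.2.1, cmd.2.2)]
      | none => acc) =
      (fun acc cmd =>
      match pvNameB cmd.1.toList with
      | some name => acc ++ [(String.ofList name, cmd.2.1, cmd.2.2)]
      | none => acc) := by
    funext acc cmd
    rw [pvName_eq]
  rw [hstep]

theorem translate_to_ProjectQ_raises : Claim_raises_translate_to_ProjectQ := by
  unfold Claim_raises_translate_to_ProjectQ
  constructor
  · intro instructions _ hr hpre
    obtain ⟨cmd, hmem, hbad⟩ := hr
    obtain ⟨h1, h2⟩ := hpre cmd hmem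
    rcases hbad with h | h
    · exact h1 h
    · exact h2 h
  · exact ⟨by decide, by decide, by set_option maxRecDepth 10000 in decide⟩

-- witness self-check: the raise-region witness really lies inside Raises_ (read off the theorem above)
theorem pvRaiseWitness_ok :
    Raises_translate_to_ProjectQ pvRaiseWitness_translate_to_ProjectQ :=
  translate_to_ProjectQ_raises.2.2.1
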